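-- pv_equiv track=rewrite | github.com/FZ920722/FT-DAG | MainHead.py | ad_to_deep
-- ===== SOURCE A (Python) =====
-- from itertools import chain, accumulate, groupby, product, zip_longest,  permutations, combinations, combinations_with_replacement
--
-- def ad_to_deep(_dag_ad, _l_num=0):
--     __un_source_nodes = set(chain(*_dag_ad.values()))
--     __all_nodes = set(_dag_ad.keys())
--     __source_nodes = __all_nodes - __un_source_nodes
--     __sret = {__snid: _l_num for __snid in __source_nodes}
--     if len(__un_source_nodes) == 0:
--         return __sret
--     else:
--         __oret = ad_to_deep({__nid: __sls for __nid, __sls in _dag_ad.items()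
--                              if __nid not in __source_nodes}, _l_num + 1)
--         return __sret | __oret
-- ===== SOURCE B (Python) =====
-- def ad_to_deep(_dag_ad, _l_num=0):
--     # Kahn-style layering: count in-degrees once, then peel zero-in-degree waves,
--     # decrementing counts incrementally instead of rebuilding the target set per layer.
--     indeg = {k: 0 for k in _dag_ad}
--     for succs in _dag_ad.values():
--         for v in succs:
--             if v in indeg:
--                 indeg[v] += 1
--     res = {}
--     remaining = list(_dag_ad.items())
--     depth = _l_num
--     while True:
--         wave = [item for item in remaining if indeg[item[0]] == 0]
--         if not wave:
--             break
--         remaining = [item for item in remaining if indeg[item[0]] != 0]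
--         for k, succs in wave:
--             res[k] = depth
--             for v in succs:
--                 if v in indeg:
--                     indeg[v] -= 1
--         depth += 1
--     return res
-- ===== Notes on version B (the rewrite author's own statement) =====
-- stated objective: alternative
-- what changed: Replaces A's recursive peeling, which rebuilds the whole target set and a filtered copy of the dict at every layer, by Kahn-style layering: in-degrees are counted once and decremented incrementally while zero-in-degree waves are peeled iteratively.
import Mathlib
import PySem

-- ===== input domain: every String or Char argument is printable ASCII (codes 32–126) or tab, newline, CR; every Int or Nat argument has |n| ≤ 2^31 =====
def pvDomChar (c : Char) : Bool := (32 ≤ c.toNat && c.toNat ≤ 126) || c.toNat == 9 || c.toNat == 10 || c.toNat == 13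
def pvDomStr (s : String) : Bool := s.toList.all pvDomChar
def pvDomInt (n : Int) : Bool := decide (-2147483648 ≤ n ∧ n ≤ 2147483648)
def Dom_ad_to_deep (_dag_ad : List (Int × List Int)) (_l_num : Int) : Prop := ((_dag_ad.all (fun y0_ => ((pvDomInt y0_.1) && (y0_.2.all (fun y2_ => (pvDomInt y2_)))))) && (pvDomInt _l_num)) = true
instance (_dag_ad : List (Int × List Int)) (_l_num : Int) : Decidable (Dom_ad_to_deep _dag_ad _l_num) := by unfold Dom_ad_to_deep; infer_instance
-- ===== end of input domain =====

-- B replaces A's recursive set-rebuilding peeling by Kahn-style layering with in-degree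
-- counts maintained incrementally (objective: alternative). Python A iterates sets whose hash
-- order is not modelled; outputs are dicts compared ignoring order, on which depth per
-- key does not depend on that order, and both ports list each layer in key order.

-- ===== PORT A =====
-- recursive peeling; fuel (d.length + 1) only makes the recursion total: it is never
-- exhausted when the Python returns (each level removes at least one key there)
def adRec : Nat → List (Int × List Int) → Int → List (Int × Int)
  | 0, _, _ => []
  | fuel+1, d, l =>
    let unsrc : PySem.Set Int := PySem.Set.ofList (d.flatMap (fun p => p.2))
    let allk : PySem.Set Int := PySem.Set.ofList (d.map (fun p => p.1))
    let src : PySem.Set Int := PySem.Set.diff allk unsrc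
    let sret : List (Int × Int) := src.map (fun k => (k, l))
    if PySem.Set.len unsrc == 0 then sret
    else sret ++ adRec fuel (d.filter (fun p => !(PySem.Set.contains src p.1))) (l + 1)

def ad_to_deep (_dag_ad : List (Int × List Int)) (_l_num : Int) : List (Int × Int) :=
  let d := (PySem.Dict.ofList _dag_ad).items
  adRec (d.length + 1) d _l_num

-- ===== PORT B =====
-- one wave of Kahn layering per step; fuel (d.length + 1) only makes the loop total:
-- each executed wave is nonempty, so it is never exhausted
def kahnLoop : Nat → List (Int × List Int) → PySem.Dict Int Int → Int → List (Int × Int) → List (Int × Int)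
  | 0, _, _, _, res => res
  | fuel+1, rem, indeg, depth, res =>
    let wave := rem.filter (fun p => indeg.getD p.1 0 == 0)
    if wave.isEmpty then res
    else
      let rem' := rem.filter (fun p => !(indeg.getD p.1 0 == 0))
      let res' := res ++ wave.map (fun p => (p.1, depth))
      let indeg' := wave.foldl (fun a p => p.2.foldl (fun a2 v => if a2.contains v then a2.modify v 0 (fun c => c - 1) else a2) a) indeg
      kahnLoop fuel rem' indeg' (depth + 1) res'

def ad_to_deep_alt (_dag_ad : List (Int × List Int)) (_l_num : Int) : List (Int × Int) :=
  let d := (PySem.Dict.ofList _dag_ad).items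
  let indeg0 := d.foldl (fun a p => a.insert p.1 (0 : Int)) PySem.Dict.empty
  let indeg := d.foldl (fun a p => p.2.foldl (fun a2 v => if a2.contains v then a2.modify v 0 (fun c => c + 1) else a2) a) indeg0
  kahnLoop (d.length + 1) d indeg _l_num []

-- ===== PRECONDITION & SPEC =====
-- helpers for Pre_: successors of a node among the dict entries, and bounded reachability
def pvSuccs (_dag_ad : List (Int × List Int)) (x : Int) : List Int :=
  ((PySem.Dict.ofList _dag_ad).get? x).getD []

def pvGrow (_dag_ad : List (Int × List Int)) : Nat → PySem.Set Int → PySem.Set Int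
  | 0, s => s
  | n+1, s => pvGrow _dag_ad n (PySem.Set.union s (s.flatMap (pvSuccs _dag_ad)))

-- Pre_ excludes exactly the inputs whose key subgraph has a directed cycle: there Python A
-- recurses forever on the same dict and raises RecursionError (returns nothing).
def Pre_ad_to_deep (_dag_ad : List (Int × List Int)) (_l_num : Int) : Prop :=
  ((PySem.Dict.ofList _dag_ad).keys.all
    (fun k => !((pvGrow _dag_ad _dag_ad.length (PySem.Set.ofList (pvSuccs _dag_ad k))).contains k))) = true

instance (_dag_ad : List (Int × List Int)) (_l_num : Int) : Decidable (Pre_ad_to_deep _dag_ad _l_num) := by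
  unfold Pre_ad_to_deep; infer_instance

def pvWitness_ad_to_deep : (List (Int × List Int)) × Int := ([(1, [2]), (2, [])], 0)

def Spec_ad_to_deep (_dag_ad : List (Int × List Int)) (_l_num : Int) (out : List (Int × Int)) : Prop := out = ad_to_deep_alt _dag_ad _l_num
instance (_dag_ad : List (Int × List Int)) (_l_num : Int) (out : List (Int × Int)) : Decidable (Spec_ad_to_deep _dag_ad _l_num out) := by unfold Spec_ad_to_deep; infer_instance

-- ===== CLAIM (what is proved, stated in full; the proofs are below) =====
def Claim_equal_ad_to_deep : Prop := ∀ (_dag_ad : List (Int × List Int)) (_l_num : Int), Dom_ad_to_deep _dag_ad _l_num → Pre_ad_to_deep _dag_ad _l_num → Spec_ad_to_deep _dag_ad _l_num (ad_to_deep _dag_ad _l_num)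


-- ===== LEMMAS AND PROOFS =====

-- contains is invariant under a guarded-modify loop
lemma contains_foldGuard (f : Int → Int) (vs : List Int) (dd : PySem.Dict Int Int) (k : Int) :
    (vs.foldl (fun a2 v => if a2.contains v then a2.modify v 0 f else a2) dd).contains k = dd.contains k := by
  induction vs generalizing dd with
  | nil => rfl
  | cons v vs ih =>
    simp only [List.foldl_cons]
    by_cases h : dd.contains v = true
    · rw [if_pos h, ih, PySem.Dict.contains_modify]
      by_cases hk : k = v
      · subst hk; simp [h]
      · simp [hk]
    · rw [if_neg h, ih]

-- getD after the increment loop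
lemma getD_foldGuard_add (vs : List Int) (dd : PySem.Dict Int Int) (k : Int) (hk : dd.contains k = true) :
    (vs.foldl (fun a2 v => if a2.contains v then a2.modify v 0 (fun c => c + 1) else a2) dd).getD k 0
      = dd.getD k 0 + (vs.count k : Int) := by
  induction vs generalizing dd with
  | nil => simp
  | cons v vs ih =>
    simp only [List.foldl_cons, List.count_cons]
    by_cases h : dd.contains v = true
    · rw [if_pos h, ih _ (by rw [PySem.Dict.contains_modify]; simp [hk]), PySem.Dict.getD_modify]
      by_cases hkv : k = v
      · subst hkv; simp; ring
      · have hvk : ¬ v = k := fun he => hkv he.symm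
        simp [hkv, hvk]
    · rw [if_neg h, ih _ hk]
      have hvk : ¬ v = k := fun he => h (he ▸ hk)
      simp [hvk]

-- getD after the decrement loop
lemma getD_foldGuard_sub (vs : List Int) (dd : PySem.Dict Int Int) (k : Int) (hk : dd.contains k = true) :
    (vs.foldl (fun a2 v => if a2.contains v then a2.modify v 0 (fun c => c - 1) else a2) dd).getD k 0
      = dd.getD k 0 - (vs.count k : Int) := by
  induction vs generalizing dd with
  | nil => simp
  | cons v vs ih =>
    simp only [List.foldl_cons, List.count_cons]
    by_cases h : dd.contains v = true
    · rw [if_pos h, ih _ (by rw [PySem.Dict.contains_modify]; simp [hk]), PySem.Dict.getD_modify]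
      by_cases hkv : k = v
      · subst hkv; simp; ring
      · have hvk : ¬ v = k := fun he => hkv he.symm
        simp [hkv, hvk]
    · rw [if_neg h, ih _ hk]
      have hvk : ¬ v = k := fun he => h (he ▸ hk)
      simp [hvk]

-- a nested fold over the entries' successor lists is a fold over the flattened list
lemma foldl_foldl_flatMap {σ : Type} (g : σ → Int → σ) (es : List (Int × List Int)) (init : σ) :
    es.foldl (fun a p => p.2.foldl g a) init = (es.flatMap (fun p => p.2)).foldl g init := by
  induction es generalizing init with
  | nil => rfl
  | cons p es ih => simp [List.foldl_append, ih]

-- the all-zero initial dict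
lemma getD_insertZero (es : List (Int × List Int)) (dd : PySem.Dict Int Int) (k : Int)
    (h : dd.getD k 0 = 0) :
    (es.foldl (fun a p => a.insert p.1 (0 : Int)) dd).getD k 0 = 0 := by
  induction es generalizing dd with
  | nil => exact h
  | cons p es ih =>
    simp only [List.foldl_cons]
    refine ih _ ?_
    rw [PySem.Dict.getD_insert]
    split <;> simp [h]

lemma contains_foldl_insertZero (es : List (Int × List Int)) :
    ∀ (dd : PySem.Dict Int Int) (k : Int),
    k ∈ es.map (fun p => p.1) ∨ dd.contains k = true →
    (es.foldl (fun a p => a.insert p.1 (0 : Int)) dd).contains k = true := by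
  induction es with
  | nil =>
    intro dd k hk
    rcases hk with h | h
    · simp at h
    · exact h
  | cons p es ih =>
    intro dd k hk
    simp only [List.foldl_cons]
    apply ih
    rcases hk with h | h
    · rw [List.map_cons] at h
      rcases List.mem_cons.mp h with h1 | h1
      · right; rw [h1]; exact PySem.Dict.contains_insert_self _ _ _
      · left; exact h1
    · right; rw [PySem.Dict.contains_insert]; simp [h]

lemma kahn_nil (fuel : Nat) (indeg : PySem.Dict Int Int) (depth : Int) (res : List (Int × Int)) :
    kahnLoop fuel [] indeg depth res = res := by
  cases fuel <;> simp [kahnLoop]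

-- a set built from a nonempty list is nonempty
lemma ofList_ne_nil {xs : List Int} (h : xs ≠ []) : PySem.Set.ofList xs ≠ [] := by
  rcases List.exists_mem_of_ne_nil xs h with ⟨x, hx⟩
  intro hc
  have := (PySem.Set.mem_ofList xs x).mpr hx
  rw [hc] at this
  exact absurd this (List.not_mem_nil)

-- Set.contains as membership
lemma set_contains_eq {s : PySem.Set Int} {x : Int} : PySem.Set.contains s x = decide (x ∈ s) := by
  simp [PySem.Set.contains]

-- when every key is a target of some remaining entry, A's peeling yields nothing
lemma adRec_stuck (fuel : Nat) :
    ∀ (d : List (Int × List Int)) (l : Int),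
    (∀ k ∈ d.map (fun p => p.1), k ∈ d.flatMap (fun p => p.2)) →
    adRec fuel d l = [] := by
  induction fuel with
  | zero => intro d l _; rfl
  | succ fuel ih =>
    intro d l h
    have hsrc : PySem.Set.diff (PySem.Set.ofList (d.map (fun p => p.1)))
        (PySem.Set.ofList (d.flatMap (fun p => p.2))) = [] := by
      apply List.filter_eq_nil_iff.mpr
      intro x hx
      have hx' : x ∈ d.map (fun p => p.1) := (PySem.Set.mem_ofList _ _).mp hx
      have : x ∈ PySem.Set.ofList (d.flatMap (fun p => p.2)) := (PySem.Set.mem_ofList _ _).mpr (h x hx')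
      simp [this]
    show (if PySem.Set.len (PySem.Set.ofList (d.flatMap (fun p => p.2))) == 0 then _ else _) = _
    split
    · simp [hsrc]
    · simp only [hsrc]
      have hfilter : d.filter (fun p => !(PySem.Set.contains ([] : PySem.Set Int) p.1)) = d := by
        apply List.filter_eq_self.mpr
        intro p _
        simp [PySem.Set.contains]
      rw [hfilter, ih d (l+1) h]
      simp

-- multiset split of the flattened successors along a filter partition
lemma count_filter_split (rem : List (Int × List Int)) (q : Int × List Int → Bool) (k : Int) :
    (((rem.filter q).flatMap (fun p => p.2)).count k)
      + (((rem.filter (fun p => !q p)).flatMap (fun p => p.2)).count k)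
      = ((rem.flatMap (fun p => p.2)).count k) := by
  induction rem with
  | nil => simp
  | cons p rem ih =>
    by_cases h : q p = true <;>
      simp [h, List.count_append] <;> omega

-- MAIN LEMMA: under the in-degree invariant one Kahn wave equals one peeling level
lemma kahn_eq_adRec (fuel : Nat) :
    ∀ (rem : List (Int × List Int)) (indeg : PySem.Dict Int Int) (l : Int) (res : List (Int × Int)),
    (rem.map (fun p => p.1)).Nodup →
    (∀ k ∈ rem.map (fun p => p.1), indeg.contains k = true) →
    (∀ k ∈ rem.map (fun p => p.1), indeg.getD k 0 = ((rem.flatMap (fun p => p.2)).count k : Int)) →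
    kahnLoop fuel rem indeg l res = res ++ adRec fuel rem l := by
  induction fuel with
  | zero => intro rem indeg l res _ _ _; simp [kahnLoop, adRec]
  | succ fuel ih =>
    intro rem indeg l res hnd hcon hinv
    have hpred : ∀ p ∈ rem,
        (indeg.getD p.1 0 == 0) = !(PySem.Set.contains (PySem.Set.ofList (rem.flatMap (fun p => p.2))) p.1) := by
      intro p hp
      have hk : p.1 ∈ rem.map (fun p => p.1) := List.mem_map_of_mem hp
      rw [hinv p.1 hk, set_contains_eq]
      by_cases hm : p.1 ∈ rem.flatMap (fun p => p.2)
      · have hc : (rem.flatMap (fun p => p.2)).count p.1 ≠ 0 := by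
          simpa [List.count_eq_zero] using hm
        have : ((((rem.flatMap (fun p => p.2)).count p.1 : Int)) == 0) = false := by
          simp [hc]
        simp [this, (PySem.Set.mem_ofList _ _).mpr hm]
      · have hc : (rem.flatMap (fun p => p.2)).count p.1 = 0 := List.count_eq_zero.mpr hm
        have hm' : p.1 ∉ PySem.Set.ofList (rem.flatMap (fun p => p.2)) := by
          intro hcn; exact hm ((PySem.Set.mem_ofList _ _).mp hcn)
        simp [hc, hm']
    have hwave : rem.filter (fun p => indeg.getD p.1 0 == 0)
        = rem.filter (fun p => !(PySem.Set.contains (PySem.Set.ofList (rem.flatMap (fun p => p.2))) p.1)) :=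
      List.filter_congr hpred
    by_cases hflat : rem.flatMap (fun p => p.2) = []
    · -- no edges at all: A returns all keys at depth l, B emits them as one final wave
      have hall : rem.filter (fun p => indeg.getD p.1 0 == 0) = rem := by
        apply List.filter_eq_self.mpr
        intro p hp
        rw [hpred p hp, hflat]
        simp [PySem.Set.contains]
      have hA : adRec (fuel+1) rem l = rem.map (fun p => (p.1, l)) := by
        show (if PySem.Set.len (PySem.Set.ofList (rem.flatMap (fun p => p.2))) == 0 then _ else _) = _
        rw [hflat]
        have : PySem.Set.diff (PySem.Set.ofList (rem.map (fun p => p.1))) (PySem.Set.ofList ([] : List Int))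
            = rem.map (fun p => p.1) := by
          rw [PySem.Set.ofList_eq_self_of_nodup _ hnd]
          apply List.filter_eq_self.mpr
          intro x _; simp [PySem.Set.contains]
        simp only [this]
        simp [PySem.Set.len, PySem.Set.ofList, List.map_map]
      rw [hA]
      show (if (rem.filter (fun p => indeg.getD p.1 0 == 0)).isEmpty then res else _) = _
      rw [hall]
      rcases eq_or_ne rem [] with hrem | hrem
      · subst hrem; simp
      · rw [if_neg (by simp [List.isEmpty_iff, hrem])]
        have hrem' : rem.filter (fun p => !(indeg.getD p.1 0 == 0)) = [] := by
          apply List.filter_eq_nil_iff.mpr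
          intro p hp
          rw [hpred p hp, hflat]
          simp [PySem.Set.contains]
        rw [hrem', kahn_nil]
    · -- some edges remain
      have hlen : (PySem.Set.len (PySem.Set.ofList (rem.flatMap (fun p => p.2))) == 0) = false := by
        have hne := ofList_ne_nil hflat
        have : (PySem.Set.ofList (rem.flatMap (fun p => p.2))).length ≠ 0 := by
          simpa [List.length_eq_zero_iff] using hne
        simp [PySem.Set.len, this]
      have hA : adRec (fuel+1) rem l =
          (PySem.Set.diff (PySem.Set.ofList (rem.map (fun p => p.1)))
              (PySem.Set.ofList (rem.flatMap (fun p => p.2)))).map (fun k => (k, l))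
            ++ adRec fuel (rem.filter (fun p =>
              !(PySem.Set.contains (PySem.Set.diff (PySem.Set.ofList (rem.map (fun p => p.1)))
                (PySem.Set.ofList (rem.flatMap (fun p => p.2)))) p.1))) (l + 1) := by
        show (if PySem.Set.len (PySem.Set.ofList (rem.flatMap (fun p => p.2))) == 0 then _ else _) = _
        rw [hlen]
        simp
      have hsrc : PySem.Set.diff (PySem.Set.ofList (rem.map (fun p => p.1)))
          (PySem.Set.ofList (rem.flatMap (fun p => p.2)))
          = (rem.filter (fun p => indeg.getD p.1 0 == 0)).map (fun p => p.1) := by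
        rw [PySem.Set.ofList_eq_self_of_nodup _ hnd, hwave]
        show (rem.map (fun p => p.1)).filter _ = _
        rw [List.filter_map]
        rfl
      by_cases hw : (rem.filter (fun p => indeg.getD p.1 0 == 0)) = []
      · -- stuck: every remaining key is still a target; both sides emit nothing
        have hstuck : ∀ k ∈ rem.map (fun p => p.1), k ∈ rem.flatMap (fun p => p.2) := by
          intro k hk
          rcases List.mem_map.mp hk with ⟨p, hp, rfl⟩
          have h1 := List.filter_eq_nil_iff.mp hw p hp
          rw [hpred p hp] at h1
          have h2 : (PySem.Set.ofList (rem.flatMap (fun p => p.2))).contains p.1 = true := by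
            cases hc : (PySem.Set.ofList (rem.flatMap (fun p => p.2))).contains p.1
            · rw [hc] at h1; exact absurd rfl h1
            · rfl
          have h3 : p.1 ∈ PySem.Set.ofList (rem.flatMap (fun p => p.2)) := by
            simpa [set_contains_eq] using h2
          exact (PySem.Set.mem_ofList _ _).mp h3
        have hAstuck : adRec (fuel+1) rem l = [] := adRec_stuck _ _ _ hstuck
        show (if (rem.filter (fun p => indeg.getD p.1 0 == 0)).isEmpty then res else _) = _
        rw [hw]
        simp [hAstuck]
      · -- a genuine wave
        show (if (rem.filter (fun p => indeg.getD p.1 0 == 0)).isEmpty then res else _) = _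
        rw [if_neg (by simp [List.isEmpty_iff, hw])]
        rw [hA, hsrc]
        have hfiltA : rem.filter (fun p =>
              !(PySem.Set.contains ((rem.filter (fun p => indeg.getD p.1 0 == 0)).map (fun p => p.1)) p.1))
            = rem.filter (fun p => !(indeg.getD p.1 0 == 0)) := by
          apply List.filter_congr
          intro p hp
          have : PySem.Set.contains ((rem.filter (fun p => indeg.getD p.1 0 == 0)).map (fun p => p.1)) p.1
              = (indeg.getD p.1 0 == 0) := by
            by_cases hz : (indeg.getD p.1 0 == 0) = true
            · rw [set_contains_eq, hz]
              simp only [decide_eq_true_eq]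
              exact List.mem_map_of_mem (List.mem_filter_of_mem hp hz)
            · have hz' : (indeg.getD p.1 0 == 0) = false := by
                revert hz; cases (indeg.getD p.1 0 == 0) <;> simp
              rw [set_contains_eq, hz']
              simp only [decide_eq_false_iff_not]
              intro hmem
              rcases List.mem_map.mp hmem with ⟨q, hq, hq1⟩
              have hqz := (List.mem_filter.mp hq).2
              rw [hq1] at hqz
              rw [hqz] at hz'
              simp at hz'
          rw [this]
        rw [hfiltA]
        -- the updated in-degree dict
        set wave := rem.filter (fun p => indeg.getD p.1 0 == 0) with hwdef
        set rem2 := rem.filter (fun p => !(indeg.getD p.1 0 == 0)) with hr2def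
        have hdouble : wave.foldl (fun a p => p.2.foldl
              (fun a2 v => if a2.contains v then a2.modify v 0 (fun c => c - 1) else a2) a) indeg
            = (wave.flatMap (fun p => p.2)).foldl
              (fun a2 v => if a2.contains v then a2.modify v 0 (fun c => c - 1) else a2) indeg :=
          foldl_foldl_flatMap _ _ _
        have hsub2 : rem2.Sublist rem := List.filter_sublist
        have hkeysub : (rem2.map (fun p => p.1)).Sublist (rem.map (fun p => p.1)) := hsub2.map _
        have hnd2 : (rem2.map (fun p => p.1)).Nodup := hnd.sublist hkeysub
        have hcon2 : ∀ k ∈ rem2.map (fun p => p.1),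
            ((wave.flatMap (fun p => p.2)).foldl
              (fun a2 v => if a2.contains v then a2.modify v 0 (fun c => c - 1) else a2) indeg).contains k = true := by
          intro k hk
          rw [contains_foldGuard]
          exact hcon k (hkeysub.mem hk)
        have hinv2 : ∀ k ∈ rem2.map (fun p => p.1),
            ((wave.flatMap (fun p => p.2)).foldl
              (fun a2 v => if a2.contains v then a2.modify v 0 (fun c => c - 1) else a2) indeg).getD k 0
            = ((rem2.flatMap (fun p => p.2)).count k : Int) := by
          intro k hk
          rw [getD_foldGuard_sub _ _ _ (hcon k (hkeysub.mem hk)), hinv k (hkeysub.mem hk)]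
          have hsplit := count_filter_split rem (fun p => indeg.getD p.1 0 == 0) k
          rw [← hwdef, ← hr2def] at hsplit
          omega
        rw [hdouble, ih rem2 _ (l+1) _ hnd2 hcon2 hinv2]
        simp [List.map_map, List.append_assoc]
  -- end

-- ===== VERDICT (by name: the statement is the Claim_ definition above) =====
theorem ad_to_deep_spec : Claim_equal_ad_to_deep := by
  intro dag l _ _
  unfold Spec_ad_to_deep ad_to_deep ad_to_deep_alt
  simp only []
  set d := (PySem.Dict.ofList dag).items with hd
  have hnd : (d.map (fun p => p.1)).Nodup := by
    have := PySem.Dict.nodup_keys_ofList (κ := Int) (ν := List Int) dag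
    simpa [PySem.Dict.keys, hd] using this
  set indeg0 := d.foldl (fun a p => a.insert p.1 (0 : Int)) PySem.Dict.empty with hi0
  set indeg := d.foldl (fun a p => p.2.foldl
      (fun a2 v => if a2.contains v then a2.modify v 0 (fun c => c + 1) else a2) a) indeg0 with hi
  have hdouble : indeg = (d.flatMap (fun p => p.2)).foldl
      (fun a2 v => if a2.contains v then a2.modify v 0 (fun c => c + 1) else a2) indeg0 := by
    rw [hi]; exact foldl_foldl_flatMap _ _ _
  have hcon0 : ∀ k ∈ d.map (fun p => p.1), indeg0.contains k = true := by
    intro k hk; rw [hi0]; exact contains_foldl_insertZero _ _ _ (Or.inl hk)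
  have hcon : ∀ k ∈ d.map (fun p => p.1), indeg.contains k = true := by
    intro k hk; rw [hdouble, contains_foldGuard]; exact hcon0 k hk
  have hinv : ∀ k ∈ d.map (fun p => p.1), indeg.getD k 0 = ((d.flatMap (fun p => p.2)).count k : Int) := by
    intro k hk
    rw [hdouble, getD_foldGuard_add _ _ _ (hcon0 k hk)]
    rw [hi0, getD_insertZero _ _ _ (by simp [PySem.Dict.getD_empty])]
    ring
  rw [kahn_eq_adRec (d.length + 1) d indeg l [] hnd hcon hinv]
  simp
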